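-- pv_equiv track=rewrite | github.com/mayhere/MGA-Planner-Tool | 1_Tisserand_Tree_Search.py | generate_chains
-- ===== SOURCE A (Python) =====
-- import os, math, itertools, time, json, traceback
--
-- MAX_RES_OTHER = 3
--
-- MAX_RES_MERCURY = 4
--
-- FLYBY_BODIES = ["Ea","Ve","Me","Ma"]
--
-- def check_resonance_cap(chain_nodes):
--     counts = {b:0 for b in FLYBY_BODIES}
--     for n in chain_nodes[1:]:
--         counts[n] = counts.get(n,0)+1
--     for b in ["Ve","Ea","Ma"]:
--         if counts.get(b,0) > MAX_RES_OTHER: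
--             return False
--     if counts.get("Me",0) > MAX_RES_MERCURY:
--         return False
--     return True
--
-- def generate_chains(min_fb, max_fb):
--     chains=[]
--     intermediates = ["Ve","Me","Ma","Ea"]
--     for fb in range(min_fb, max_fb+1):
--         for seq in itertools.product(intermediates, repeat=fb):
--             nodes = ["Ea"] + list(seq)
--             if nodes[-1] != "Me":
--                 continue
--             if not check_resonance_cap(nodes):
--                 continue
--             chains.append(nodes)
--     return chains
-- ===== SOURCE B (Python) =====
-- def generate_chains(min_fb, max_fb):
--     # DFS backtracking: build the flyby sequence left to right, abandoning a
--     # branch as soon as a body's resonance cap is exceeded or the remaining cap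
--     # capacity cannot fill the remaining slots, and forcing the final body to be
--     # "Me"; same emission order as exhaustive product enumeration.
--     chains = []
--
--     def dfs(seq, nVe, nMe, nMa, nEa, rem):
--         if rem == 0:
--             chains.append(["Ea"] + seq)
--             return
--         if (3 - nVe) + (4 - nMe) + (3 - nMa) + (3 - nEa) < rem:
--             return
--         if rem == 1:
--             if nMe < 4:
--                 dfs(seq + ["Me"], nVe, nMe + 1, nMa, nEa, 0)
--             return
--         if nVe < 3:
--             dfs(seq + ["Ve"], nVe + 1, nMe, nMa, nEa, rem - 1)
--         if nMe < 4:
--             dfs(seq + ["Me"], nVe, nMe + 1, nMa, nEa, rem - 1)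
--         if nMa < 3:
--             dfs(seq + ["Ma"], nVe, nMe, nMa + 1, nEa, rem - 1)
--         if nEa < 3:
--             dfs(seq + ["Ea"], nVe, nMe, nMa, nEa + 1, rem - 1)
--
--     for fb in range(min_fb, max_fb + 1):
--         if fb >= 1:
--             dfs([], 0, 0, 0, 0, fb)
--     return chains
-- ===== Notes on version B (the rewrite author's own statement) =====
-- stated objective: alternative
-- what changed: replaces the exhaustive 4^fb itertools.product enumeration with post-filtering by a DFS backtracking that prunes a branch as soon as a resonance cap (or the remaining cap capacity) is exceeded and forces the final body to be Me, emitting chains in the same order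
import Mathlib
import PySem

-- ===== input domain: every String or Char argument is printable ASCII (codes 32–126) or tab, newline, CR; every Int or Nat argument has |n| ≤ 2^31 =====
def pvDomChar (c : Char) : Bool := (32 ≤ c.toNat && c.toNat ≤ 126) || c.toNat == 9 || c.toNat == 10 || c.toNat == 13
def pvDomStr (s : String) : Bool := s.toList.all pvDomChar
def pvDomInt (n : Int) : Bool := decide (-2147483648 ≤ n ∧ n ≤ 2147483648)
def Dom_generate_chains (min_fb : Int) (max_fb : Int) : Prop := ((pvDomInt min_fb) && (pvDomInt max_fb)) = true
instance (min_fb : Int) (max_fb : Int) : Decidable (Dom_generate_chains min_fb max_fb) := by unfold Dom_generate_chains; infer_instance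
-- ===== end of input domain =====

-- B replaces A's exhaustive 4^fb product enumeration + post-filter by a DFS backtracking
-- that prunes on the resonance caps and forces the last flyby to be "Me" (alternative algorithm).

-- ===== PORT A =====
def FLYBY_BODIES : List String := ["Ea", "Ve", "Me", "Ma"]

def check_resonance_cap (chain_nodes : List String) : Bool :=
  -- counts = {b:0 for b in FLYBY_BODIES}; then counts[n] = counts.get(n,0)+1 over chain_nodes[1:]
  let counts0 : PySem.Dict String Int :=
    FLYBY_BODIES.foldl (fun d b => d.insert b 0) PySem.Dict.empty
  let counts :=
    (PySem.List.slice chain_nodes (some 1) none).foldl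
      (fun d n => d.insert n (d.getD n 0 + 1)) counts0
  -- the early-return loop over ["Ve","Ea","Ma"] ported as 'any'
  if (["Ve", "Ea", "Ma"] : List String).any (fun b => counts.getD b 0 > 3) then false
  else if counts.getD "Me" 0 > 4 then false
  else true

-- itertools.product(xs, repeat=n): leftmost position varies slowest
def pyProduct (xs : List String) : Nat → List (List String)
  | 0 => [[]]
  | n + 1 => xs.flatMap (fun x => (pyProduct xs n).map (x :: ·))

-- 'repeat=fb' is ported as fb.toNat: for fb < 0 Python raises ValueError (excluded by Pre_).
def generate_chains (min_fb : Int) (max_fb : Int) : List (List String) :=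
  (PySem.List.pyRange min_fb (max_fb + 1) 1).foldl
    (fun chains fb =>
      (pyProduct ["Ve", "Me", "Ma", "Ea"] fb.toNat).foldl
        (fun chains seq =>
          let nodes := "Ea" :: seq
          if PySem.List.pyGet? nodes (-1) ≠ some "Me" then chains
          else if ¬ check_resonance_cap nodes then chains
          else chains ++ [nodes])
        chains)
    []

-- ===== PORT B =====
-- dfs(seq, nVe, nMe, nMa, nEa, rem) of Source B; the closure-appended chains become the returned list
def dfsB : List String → Int → Int → Int → Int → Nat → List (List String)
  | seq, _, _, _, _, 0 => [["Ea"] ++ seq]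
  | seq, nVe, nMe, nMa, nEa, 1 =>
      if (3 - nVe) + (4 - nMe) + (3 - nMa) + (3 - nEa) < (1 : Int) then []
      else if nMe < 4 then dfsB (seq ++ ["Me"]) nVe (nMe + 1) nMa nEa 0 else []
  | seq, nVe, nMe, nMa, nEa, (r + 2) =>
      if (3 - nVe) + (4 - nMe) + (3 - nMa) + (3 - nEa) < ((r : Int) + 2) then []
      else
      (if nVe < 3 then dfsB (seq ++ ["Ve"]) (nVe + 1) nMe nMa nEa (r + 1) else []) ++
      (if nMe < 4 then dfsB (seq ++ ["Me"]) nVe (nMe + 1) nMa nEa (r + 1) else []) ++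
      (if nMa < 3 then dfsB (seq ++ ["Ma"]) nVe nMe (nMa + 1) nEa (r + 1) else []) ++
      (if nEa < 3 then dfsB (seq ++ ["Ea"]) nVe nMe nMa (nEa + 1) (r + 1) else [])

def generate_chains_alt (min_fb : Int) (max_fb : Int) : List (List String) :=
  (PySem.List.pyRange min_fb (max_fb + 1) 1).foldl
    (fun chains fb => if 1 ≤ fb then chains ++ dfsB [] 0 0 0 0 fb.toNat else chains)
    []

-- ===== PRECONDITION & SPEC =====
-- Pre_ excludes exactly the inputs where A raises: itertools.product(..., repeat=fb)
-- raises ValueError for a negative fb, i.e. whenever the range is nonempty and starts below 0.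
def Pre_generate_chains (min_fb : Int) (max_fb : Int) : Prop :=
  0 ≤ min_fb ∨ max_fb < min_fb
instance (min_fb : Int) (max_fb : Int) : Decidable (Pre_generate_chains min_fb max_fb) := by
  unfold Pre_generate_chains; infer_instance

def pvWitness_generate_chains : Int × Int := (1, 3)

def Spec_generate_chains (min_fb : Int) (max_fb : Int) (out : List (List String)) : Prop := out = generate_chains_alt min_fb max_fb
instance (min_fb : Int) (max_fb : Int) (out : List (List String)) : Decidable (Spec_generate_chains min_fb max_fb out) := by unfold Spec_generate_chains; infer_instance

-- ===== CLAIM (what is proved, stated in full; the proofs are below) =====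
def Claim_equal_generate_chains : Prop := ∀ (min_fb : Int) (max_fb : Int), Dom_generate_chains min_fb max_fb → Pre_generate_chains min_fb max_fb → Spec_generate_chains min_fb max_fb (generate_chains min_fb max_fb)

-- ===== LEMMAS AND PROOFS =====

-- A's acceptance condition on the intermediate sequence s (nodes = "Ea" :: s)
def condP (s : List String) : Bool :=
  (s.getLast? == some "Me") && decide (s.count "Ve" ≤ 3) && decide (s.count "Me" ≤ 4)
    && decide (s.count "Ma" ≤ 3) && decide (s.count "Ea" ≤ 3)

theorem foldl_counts (tail : List String) (d : PySem.Dict String Int) (b : String) :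
    (tail.foldl (fun d n => d.insert n (d.getD n 0 + 1)) d).getD b 0
      = d.getD b 0 + (tail.count b : Int) := by
  induction tail generalizing d with
  | nil => simp
  | cons x t ih =>
      simp only [List.foldl_cons, ih, PySem.Dict.getD_insert, List.count_cons]
      by_cases h : b = x
      · subst h; simp; ring
      · simp [h, Ne.symm h]

theorem check_eq (s : List String) :
    check_resonance_cap ("Ea" :: s)
      = (decide (s.count "Ve" ≤ 3) && decide (s.count "Me" ≤ 4)
          && decide (s.count "Ma" ≤ 3) && decide (s.count "Ea" ≤ 3)) := by
  simp only [check_resonance_cap, PySem.List.slice_from_one, List.tail_cons]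
  simp only [foldl_counts]
  norm_num [FLYBY_BODIES, PySem.Dict.getD_insert, PySem.Dict.empty]
  by_cases h1 : s.count "Ve" ≤ 3 <;> by_cases h2 : s.count "Me" ≤ 4 <;>
    by_cases h3 : s.count "Ma" ≤ 3 <;> by_cases h4 : s.count "Ea" ≤ 3 <;>
    simp [h1, h2, h3, h4] <;> omega

theorem stepA_eq (acc : List (List String)) (s : List String) (hs : s ≠ []) :
    (let nodes := "Ea" :: s
      if PySem.List.pyGet? nodes (-1) ≠ some "Me" then acc
      else if ¬ check_resonance_cap nodes then acc
      else acc ++ [nodes])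
    = (if condP s then acc ++ ["Ea" :: s] else acc) := by
  have hlast : PySem.List.pyGet? ("Ea" :: s) (-1) = s.getLast? := by
    rw [PySem.List.pyGet?_neg_one]
    cases s with
    | nil => exact absurd rfl hs
    | cons a t => simp [List.getLast?_cons_cons]
  simp only [hlast, check_eq, condP]
  by_cases h : s.getLast? = some "Me" <;>
    by_cases h1 : s.count "Ve" ≤ 3 <;> by_cases h2 : s.count "Me" ≤ 4 <;>
    by_cases h3 : s.count "Ma" ≤ 3 <;> by_cases h4 : s.count "Ea" ≤ 3 <;>
    simp [h, h1, h2, h3, h4]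

theorem foldlA_eq (l : List (List String)) (hl : ∀ t ∈ l, t ≠ []) (acc : List (List String)) :
    l.foldl (fun chains seq =>
        let nodes := "Ea" :: seq
        if PySem.List.pyGet? nodes (-1) ≠ some "Me" then chains
        else if ¬ check_resonance_cap nodes then chains
        else chains ++ [nodes]) acc
      = acc ++ (l.filter condP).map ("Ea" :: ·) := by
  calc l.foldl (fun chains seq =>
        let nodes := "Ea" :: seq
        if PySem.List.pyGet? nodes (-1) ≠ some "Me" then chains
        else if ¬ check_resonance_cap nodes then chains
        else chains ++ [nodes]) acc
      = l.foldl (fun chains seq =>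
          if condP seq then chains ++ [("Ea" :: ·) seq] else chains) acc :=
        PySem.List.foldl_congr_mem' l _ _ acc (fun x hx acc' => stepA_eq acc' x (hl x hx))
    _ = acc ++ (l.filter condP).map ("Ea" :: ·) :=
        PySem.List.foldl_append_if condP (fun s => "Ea" :: s) l acc

theorem mem_pyProduct_ne_nil (xs : List String) (n : Nat) (hn : 1 ≤ n)
    (t : List String) (ht : t ∈ pyProduct xs n) : t ≠ [] := by
  match n, hn with
  | n + 1, _ =>
    simp only [pyProduct, List.mem_flatMap, List.mem_map] at ht
    obtain ⟨x, _, u, _, rfl⟩ := ht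
    simp

theorem pyProduct_count_sum (n : Nat) : ∀ t ∈ pyProduct ["Ve", "Me", "Ma", "Ea"] n,
    t.count "Ve" + t.count "Me" + t.count "Ma" + t.count "Ea" = n := by
  induction n with
  | zero => intro t ht; simp [pyProduct] at ht; subst ht; simp
  | succ k ih =>
    intro t ht
    simp only [pyProduct, List.mem_flatMap, List.mem_map] at ht
    obtain ⟨b, hb, u, hu, rfl⟩ := ht
    have hsum := ih u hu
    fin_cases hb <;> simp [List.count_cons] <;> omega

theorem filter_capfull (k : Nat) (seq : List String)
    (hg : (3 - (seq.count "Ve" : Int)) + (4 - (seq.count "Me" : Int))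
        + (3 - (seq.count "Ma" : Int)) + (3 - (seq.count "Ea" : Int)) < (k : Int) + 1) :
    (pyProduct ["Ve", "Me", "Ma", "Ea"] (k + 1)).filter (fun t => condP (seq ++ t)) = [] := by
  apply List.filter_eq_nil_iff.mpr
  intro t ht
  have hsum := pyProduct_count_sum (k + 1) t ht
  simp [condP, List.count_append]
  intros
  omega

-- the main invariant: DFS with correct counters enumerates exactly A's filtered products
theorem dfsB_eq (n : Nat) (hn : 1 ≤ n) : ∀ (seq : List String),
    seq.count "Ve" ≤ 3 → seq.count "Me" ≤ 4 → seq.count "Ma" ≤ 3 → seq.count "Ea" ≤ 3 →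
    dfsB seq (seq.count "Ve") (seq.count "Me") (seq.count "Ma") (seq.count "Ea") n
      = ((pyProduct ["Ve", "Me", "Ma", "Ea"] n).filter (fun t => condP (seq ++ t))).map
          (fun t => "Ea" :: (seq ++ t)) := by
  induction n with
  | zero => omega
  | succ k ih =>
    intro seq hV hM hMa hE
    by_cases hg : (3 - (seq.count "Ve" : Int)) + (4 - (seq.count "Me" : Int))
        + (3 - (seq.count "Ma" : Int)) + (3 - (seq.count "Ea" : Int)) < (k : Int) + 1
    case pos =>
      rw [filter_capfull k seq hg]
      cases k with
      | zero => simp only [dfsB]; rw [if_pos (by omega)]; simp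
      | succ k => simp only [dfsB]; rw [if_pos (by push_cast at hg ⊢; omega)]; simp
    case neg =>
    cases k with
    | zero =>
      -- base case n = 1
      have hp1 : pyProduct ["Ve", "Me", "Ma", "Ea"] 1 = [["Ve"], ["Me"], ["Ma"], ["Ea"]] := rfl
      rw [hp1]
      have c1 : condP (seq ++ ["Ve"]) = false := by simp [condP]
      have c3 : condP (seq ++ ["Ma"]) = false := by simp [condP]
      have c4 : condP (seq ++ ["Ea"]) = false := by simp [condP]
      have c2 : condP (seq ++ ["Me"]) = decide (seq.count "Me" + 1 ≤ 4) := by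
        simp [condP, List.count_append, hV, hMa, hE]
      simp only [List.filter_cons, c1, c2, c3, c4, List.filter_nil]
      have hg' : ¬ ((3 - (seq.count "Ve" : Int)) + (4 - (seq.count "Me" : Int))
          + (3 - (seq.count "Ma" : Int)) + (3 - (seq.count "Ea" : Int)) < (1 : Int)) := by
        omega
      by_cases hm : (seq.count "Me" : Int) < 4
      · have hm' : seq.count "Me" + 1 ≤ 4 := by omega
        simp [dfsB, hm, hm', hg']
      · have hm' : ¬ (seq.count "Me" + 1 ≤ 4) := by omega
        simp [dfsB, hm, hm', hg']
    | succ k =>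
      -- step: n = k + 2; recursive calls are at k + 1, covered by ih
      have hsplit : pyProduct ["Ve", "Me", "Ma", "Ea"] (k + 2)
          = (["Ve", "Me", "Ma", "Ea"] : List String).flatMap
              (fun b => (pyProduct ["Ve", "Me", "Ma", "Ea"] (k + 1)).map (b :: ·)) := rfl
      rw [hsplit, List.filter_flatMap, List.map_flatMap]
      have hbr : ∀ b : String,
          (((pyProduct ["Ve", "Me", "Ma", "Ea"] (k + 1)).map (b :: ·)).filter
              (fun t => condP (seq ++ t))).map (fun t => "Ea" :: (seq ++ t))
            = ((pyProduct ["Ve", "Me", "Ma", "Ea"] (k + 1)).filter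
                (fun u => condP ((seq ++ [b]) ++ u))).map
                (fun u => "Ea" :: ((seq ++ [b]) ++ u)) := by
        intro b
        have e1 : ((fun t => condP (seq ++ t)) ∘ (fun u => b :: u))
            = fun u => condP ((seq ++ [b]) ++ u) := by
          funext u; simp [Function.comp]
        have e2 : ((fun t => "Ea" :: (seq ++ t)) ∘ (fun u => b :: u))
            = fun u => "Ea" :: ((seq ++ [b]) ++ u) := by
          funext u; simp [Function.comp]
        rw [List.filter_map, List.map_map, e1, e2]
      simp only [List.flatMap_cons, List.flatMap_nil, List.append_nil, hbr]
      -- the four DFS branches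
      have hVe : (if (seq.count "Ve" : Int) < 3
            then dfsB (seq ++ ["Ve"]) ((seq.count "Ve" : Int) + 1) (seq.count "Me")
              (seq.count "Ma") (seq.count "Ea") (k + 1) else [])
          = ((pyProduct ["Ve", "Me", "Ma", "Ea"] (k + 1)).filter
              (fun u => condP ((seq ++ ["Ve"]) ++ u))).map
              (fun u => "Ea" :: ((seq ++ ["Ve"]) ++ u)) := by
        by_cases hb : (seq.count "Ve" : Int) < 3
        · rw [if_pos hb]
          have h := ih (by omega) (seq ++ ["Ve"]) (by simp; omega) (by simp [hM])
            (by simp [hMa]) (by simp [hE])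
          simpa [List.count_append] using h
        · rw [if_neg hb]
          have hnil : ((pyProduct ["Ve", "Me", "Ma", "Ea"] (k + 1)).filter
              (fun u => condP ((seq ++ ["Ve"]) ++ u))) = [] := by
            apply List.filter_eq_nil_iff.mpr
            intro u _
            have hc : seq.count "Ve" + 1 ≤ ((seq ++ ["Ve"]) ++ u).count "Ve" := by
              simp [List.count_append]
            have hb' : ¬ (((seq ++ ["Ve"]) ++ u).count "Ve" ≤ 3) := by omega
            simp [condP]
            intros; omega
          rw [hnil]; simp
      have hMe : (if (seq.count "Me" : Int) < 4
            then dfsB (seq ++ ["Me"]) (seq.count "Ve") ((seq.count "Me" : Int) + 1)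
              (seq.count "Ma") (seq.count "Ea") (k + 1) else [])
          = ((pyProduct ["Ve", "Me", "Ma", "Ea"] (k + 1)).filter
              (fun u => condP ((seq ++ ["Me"]) ++ u))).map
              (fun u => "Ea" :: ((seq ++ ["Me"]) ++ u)) := by
        by_cases hb : (seq.count "Me" : Int) < 4
        · rw [if_pos hb]
          have h := ih (by omega) (seq ++ ["Me"]) (by simp [hV]) (by simp; omega)
            (by simp [hMa]) (by simp [hE])
          simpa [List.count_append] using h
        · rw [if_neg hb]
          have hnil : ((pyProduct ["Ve", "Me", "Ma", "Ea"] (k + 1)).filter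
              (fun u => condP ((seq ++ ["Me"]) ++ u))) = [] := by
            apply List.filter_eq_nil_iff.mpr
            intro u _
            have hc : seq.count "Me" + 1 ≤ ((seq ++ ["Me"]) ++ u).count "Me" := by
              simp [List.count_append]
            have hb' : ¬ (((seq ++ ["Me"]) ++ u).count "Me" ≤ 4) := by omega
            simp [condP]
            intros; omega
          rw [hnil]; simp
      have hMaB : (if (seq.count "Ma" : Int) < 3
            then dfsB (seq ++ ["Ma"]) (seq.count "Ve") (seq.count "Me")
              ((seq.count "Ma" : Int) + 1) (seq.count "Ea") (k + 1) else [])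
          = ((pyProduct ["Ve", "Me", "Ma", "Ea"] (k + 1)).filter
              (fun u => condP ((seq ++ ["Ma"]) ++ u))).map
              (fun u => "Ea" :: ((seq ++ ["Ma"]) ++ u)) := by
        by_cases hb : (seq.count "Ma" : Int) < 3
        · rw [if_pos hb]
          have h := ih (by omega) (seq ++ ["Ma"]) (by simp [hV]) (by simp [hM])
            (by simp; omega) (by simp [hE])
          simpa [List.count_append] using h
        · rw [if_neg hb]
          have hnil : ((pyProduct ["Ve", "Me", "Ma", "Ea"] (k + 1)).filter
              (fun u => condP ((seq ++ ["Ma"]) ++ u))) = [] := by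
            apply List.filter_eq_nil_iff.mpr
            intro u _
            have hc : seq.count "Ma" + 1 ≤ ((seq ++ ["Ma"]) ++ u).count "Ma" := by
              simp [List.count_append]
            have hb' : ¬ (((seq ++ ["Ma"]) ++ u).count "Ma" ≤ 3) := by omega
            simp [condP]
            intros; omega
          rw [hnil]; simp
      have hEa : (if (seq.count "Ea" : Int) < 3
            then dfsB (seq ++ ["Ea"]) (seq.count "Ve") (seq.count "Me")
              (seq.count "Ma") ((seq.count "Ea" : Int) + 1) (k + 1) else [])
          = ((pyProduct ["Ve", "Me", "Ma", "Ea"] (k + 1)).filter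
              (fun u => condP ((seq ++ ["Ea"]) ++ u))).map
              (fun u => "Ea" :: ((seq ++ ["Ea"]) ++ u)) := by
        by_cases hb : (seq.count "Ea" : Int) < 3
        · rw [if_pos hb]
          have h := ih (by omega) (seq ++ ["Ea"]) (by simp [hV]) (by simp [hM])
            (by simp [hMa]) (by simp; omega)
          simpa [List.count_append] using h
        · rw [if_neg hb]
          have hnil : ((pyProduct ["Ve", "Me", "Ma", "Ea"] (k + 1)).filter
              (fun u => condP ((seq ++ ["Ea"]) ++ u))) = [] := by
            apply List.filter_eq_nil_iff.mpr
            intro u _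
            have hc : seq.count "Ea" + 1 ≤ ((seq ++ ["Ea"]) ++ u).count "Ea" := by
              simp [List.count_append]
            have hb' : ¬ (((seq ++ ["Ea"]) ++ u).count "Ea" ≤ 3) := by omega
            simp [condP]
            intros; omega
          rw [hnil]; simp
      simp only [dfsB]
      rw [if_neg (by push_cast at hg ⊢; omega), hVe, hMe, hMaB, hEa]
      simp [List.append_assoc]

-- the per-iteration steps of the two outer loops agree for every fb
theorem step_eq (acc : List (List String)) (fb : Int) :
    (pyProduct ["Ve", "Me", "Ma", "Ea"] fb.toNat).foldl
      (fun chains seq =>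
        let nodes := "Ea" :: seq
        if PySem.List.pyGet? nodes (-1) ≠ some "Me" then chains
        else if ¬ check_resonance_cap nodes then chains
        else chains ++ [nodes]) acc
    = (if 1 ≤ fb then acc ++ dfsB [] 0 0 0 0 fb.toNat else acc) := by
  by_cases h : 1 ≤ fb
  · have hn : 1 ≤ fb.toNat := by omega
    rw [foldlA_eq _ (mem_pyProduct_ne_nil _ _ hn), if_pos h]
    have hd := dfsB_eq fb.toNat hn [] (by simp) (by simp) (by simp) (by simp)
    simp only [List.count_nil, Nat.cast_zero, List.nil_append] at hd
    rw [hd]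
  · have hn : fb.toNat = 0 := by omega
    rw [hn, if_neg h]
    have : pyProduct ["Ve", "Me", "Ma", "Ea"] 0 = [[]] := rfl
    rw [this]
    simp [PySem.List.pyGet?_neg_one]

-- ===== VERDICT (by name: the statement is the Claim_ definition above) =====
theorem generate_chains_spec : Claim_equal_generate_chains := by
  intro min_fb max_fb _ _
  unfold Spec_generate_chains generate_chains generate_chains_alt
  have hstep : (fun (chains : List (List String)) (fb : Int) =>
      (pyProduct ["Ve", "Me", "Ma", "Ea"] fb.toNat).foldl
        (fun chains seq =>
          let nodes := "Ea" :: seq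
          if PySem.List.pyGet? nodes (-1) ≠ some "Me" then chains
          else if ¬ check_resonance_cap nodes then chains
          else chains ++ [nodes]) chains)
    = (fun (chains : List (List String)) (fb : Int) =>
        if 1 ≤ fb then chains ++ dfsB [] 0 0 0 0 fb.toNat else chains) := by
    funext acc fb; exact step_eq acc fb
  rw [hstep]
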